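-- pv_equiv track=rewrite | github.com/jackccf/my_code_snippets | tma2/q2a.py | isGoodFortune
-- ===== SOURCE A (Python) =====
-- def isGoodFortune(name):
--     evilLetters = ('E', 'V', 'I', 'L', 'e', 'v', 'i', 'l')
--     badLetters = ('B', 'A', 'D', 'b', 'a', 'd')
--
--     countEvil = 0
--     countBad = 0
--     countEmpty = 0
--
--     if not isinstance(name, str):   # if input is not string, return None
--         return None
--     else:
--         nameList = list(name)   # convert string to list type
--         lenName = len(nameList)
--
--         for i in nameList:
--             if i in evilLetters:    # count number of evil and bad letters at the name
--                 countEvil += 1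
--                 countBad += 1
--             elif i in badLetters:   # further count number of bad letters
--                 countBad += 1
--             elif i == ' ':  # count the space letter
--                 countEmpty += 1
--
--         countGood = lenName - countBad - countEmpty  # count number of good letters
--
--         if countEvil > 0:   # return False if any evil letters exist
--             return False
--         elif countGood - countBad <= 0:  # return False if good letters is less or equal than bad letters
--             return False
--         else:   # return True otherwise
--             return True
-- ===== SOURCE B (Python) =====
-- def isGoodFortune(name):
--     if not isinstance(name, str):
--         return None
--     freq = {}
--     for ch in name:
--         freq[ch] = freq.get(ch, 0) + 1
--     countEvil = sum(freq.get(c, 0) for c in 'EVILevil')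
--     countBad = countEvil + sum(freq.get(c, 0) for c in 'BADbad')
--     countEmpty = freq.get(' ', 0)
--     countGood = len(name) - countBad - countEmpty
--     return countEvil == 0 and countGood > countBad
-- ===== Notes on version B (the rewrite author's own statement) =====
-- stated objective: idiomatic
-- what changed: Replaces the per-character three-way tuple-membership loop with a single frequency-dict pass followed by closed-form sums of lookups over the fixed letter groups, folding the return chain into one boolean expression (reproducing A's double-counting of evil letters into countBad).
import Mathlib
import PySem

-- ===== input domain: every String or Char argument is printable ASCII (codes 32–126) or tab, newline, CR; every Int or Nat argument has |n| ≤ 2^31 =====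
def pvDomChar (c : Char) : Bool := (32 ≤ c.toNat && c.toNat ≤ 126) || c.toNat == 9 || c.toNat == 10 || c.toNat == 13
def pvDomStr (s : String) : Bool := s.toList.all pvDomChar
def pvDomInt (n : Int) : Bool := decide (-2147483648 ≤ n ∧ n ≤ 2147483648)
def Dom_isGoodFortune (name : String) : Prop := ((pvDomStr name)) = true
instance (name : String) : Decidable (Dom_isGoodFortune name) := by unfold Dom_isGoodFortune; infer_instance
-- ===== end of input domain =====

-- B replaces A's per-character three-branch counting loop by one frequency-dict pass plus
-- closed-form sums of lookups over the fixed letter groups (objective: idiomatic).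

-- ===== PORT A =====
def pvEvilLetters : List Char := ['E', 'V', 'I', 'L', 'e', 'v', 'i', 'l']
def pvBadLetters : List Char := ['B', 'A', 'D', 'b', 'a', 'd']

def isGoodFortune (name : String) : Bool :=
  let nameList := name.toList
  let lenName : Int := nameList.length
  let st : Int × Int × Int := nameList.foldl (fun acc i =>
      if pvEvilLetters.contains i then (acc.1 + 1, acc.2.1 + 1, acc.2.2)
      else if pvBadLetters.contains i then (acc.1, acc.2.1 + 1, acc.2.2)
      else if i = ' ' then (acc.1, acc.2.1, acc.2.2 + 1)
      else acc) (0, 0, 0)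
  let countEvil := st.1
  let countBad := st.2.1
  let countEmpty := st.2.2
  let countGood := lenName - countBad - countEmpty
  if countEvil > 0 then false
  else if countGood - countBad ≤ 0 then false
  else true

-- ===== PORT B =====
def isGoodFortune_alt (name : String) : Bool :=
  let freq : PySem.Dict Char Int :=
    name.toList.foldl (fun d ch => d.insert ch (d.getD ch 0 + 1)) PySem.Dict.empty
  let countEvil := ("EVILevil".toList.map (fun c => freq.getD c 0)).sum
  let countBad := countEvil + ("BADbad".toList.map (fun c => freq.getD c 0)).sum
  let countEmpty := freq.getD ' ' 0
  let countGood := PySem.Str.len name - countBad - countEmpty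
  decide (countEvil = 0) && decide (countGood > countBad)

-- ===== PRECONDITION & SPEC =====
def Spec_isGoodFortune (name : String) (out : Bool) : Prop := out = isGoodFortune_alt name
instance (name : String) (out : Bool) : Decidable (Spec_isGoodFortune name out) := by unfold Spec_isGoodFortune; infer_instance

-- ===== CLAIM (what is proved, stated in full; the proofs are below) =====
def Claim_equal_isGoodFortune : Prop := ∀ (name : String), Dom_isGoodFortune name → Spec_isGoodFortune name (isGoodFortune name)

-- ===== LEMMAS AND PROOFS =====

-- sum of per-letter counts over a group: the common closed form of both programs
def pvGroupSum (g : List Char) (l : List Char) : Int := (g.map (fun c => (l.count c : Int))).sum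

lemma pvIndicator_not_mem (g : List Char) (x : Char) (hx : x ∉ g) :
    (g.map (fun c => (if c = x then (1 : Int) else 0))).sum = 0 := by
  induction g with
  | nil => simp
  | cons c g' ih =>
    simp only [List.mem_cons, not_or] at hx
    simp [Ne.symm hx.1, ih hx.2]

lemma pvIndicator_mem (g : List Char) (hg : g.Nodup) (x : Char) (hx : x ∈ g) :
    (g.map (fun c => (if c = x then (1 : Int) else 0))).sum = 1 := by
  induction g with
  | nil => simp at hx
  | cons c g' ih =>
    rcases List.nodup_cons.mp hg with ⟨hc, hg'⟩
    by_cases hcx : c = x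
    · subst hcx
      simp [pvIndicator_not_mem g' c hc]
    · rcases List.mem_cons.mp hx with h | h
      · exact absurd h.symm hcx
      · simp [hcx, ih hg' h]

lemma pvGroupSum_cons (g : List Char) (hg : g.Nodup) (x : Char) (l : List Char) :
    pvGroupSum g (x :: l) = pvGroupSum g l + (if x ∈ g then 1 else 0) := by
  have hmap : g.map (fun c => ((x :: l).count c : Int))
      = g.map (fun c => (l.count c : Int) + (if c = x then 1 else 0)) := by
    refine List.map_congr_left (fun c _ => ?_)
    by_cases hcx : c = x
    · subst hcx
      simp
    · simp [List.count_cons, hcx, beq_eq_false_iff_ne.mpr (fun h => hcx h.symm)]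
  unfold pvGroupSum
  rw [hmap, List.sum_map_add]
  by_cases hx : x ∈ g
  · rw [pvIndicator_mem g hg x hx]; simp [hx]
  · rw [pvIndicator_not_mem g x hx]; simp [hx]

lemma pvGroupSum_nonneg (g l : List Char) : 0 ≤ pvGroupSum g l := by
  unfold pvGroupSum
  induction g with
  | nil => simp
  | cons c g' ih => simp only [List.map_cons, List.sum_cons]; positivity

-- A's loop invariant: the fold computes the group sums (evil letters counted into both)
lemma pvFoldA (l : List Char) (e b s : Int) :
    l.foldl (fun acc i =>
      if pvEvilLetters.contains i then (acc.1 + 1, acc.2.1 + 1, acc.2.2)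
      else if pvBadLetters.contains i then (acc.1, acc.2.1 + 1, acc.2.2)
      else if i = ' ' then (acc.1, acc.2.1, acc.2.2 + 1)
      else acc) ((e, b, s) : Int × Int × Int)
    = (e + pvGroupSum pvEvilLetters l,
       b + pvGroupSum pvEvilLetters l + pvGroupSum pvBadLetters l,
       s + (l.count ' ' : Int)) := by
  have hE : pvEvilLetters.Nodup := by decide
  have hB : pvBadLetters.Nodup := by decide
  induction l generalizing e b s with
  | nil => simp [pvGroupSum]
  | cons x l ih =>
    rw [List.foldl_cons, pvGroupSum_cons _ hE, pvGroupSum_cons _ hB, List.count_cons]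
    by_cases hxe : x ∈ pvEvilLetters
    · have hxb : x ∉ pvBadLetters := by fin_cases hxe <;> decide
      have hxs : x ≠ ' ' := by fin_cases hxe <;> decide
      rw [if_pos (by simpa using hxe), ih]
      have hsp : (x == ' ') = false := beq_eq_false_iff_ne.mpr hxs
      simp only [hxe, hxb, if_true, if_false, hsp, Prod.mk.injEq]
      refine ⟨by ring, by ring, by simp⟩
    · by_cases hxb : x ∈ pvBadLetters
      · have hxs : x ≠ ' ' := by fin_cases hxb <;> decide
        rw [if_neg (by simpa using hxe), if_pos (by simpa using hxb), ih]
        have hsp : (x == ' ') = false := beq_eq_false_iff_ne.mpr hxs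
        simp only [hxe, hxb, if_true, if_false, hsp, Prod.mk.injEq]
        refine ⟨by ring, by ring, by simp⟩
      · by_cases hxs : x = ' '
        · rw [if_neg (by simpa using hxe), if_neg (by simpa using hxb), if_pos hxs, ih]
          have hsp : (x == ' ') = true := by simp [hxs]
          simp only [hxe, hxb, if_false, hsp, Prod.mk.injEq]
          refine ⟨by ring, by ring, by push_cast; ring⟩
        · rw [if_neg (by simpa using hxe), if_neg (by simpa using hxb), if_neg hxs, ih]
          have hsp : (x == ' ') = false := beq_eq_false_iff_ne.mpr hxs
          simp only [hxe, hxb, if_false, hsp, Prod.mk.injEq]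
          refine ⟨by ring, by ring, by simp⟩


-- B's frequency dict is Counter, so each lookup is a count
lemma pvFreqGetD (l : List Char) (c : Char) :
    (l.foldl (fun d ch => d.insert ch (d.getD ch 0 + 1)) PySem.Dict.empty).getD c 0
      = (l.count c : Int) := by
  rw [PySem.Dict.foldl_insert_getD_add_one_eq_counter, PySem.Dict.getD_counter]


-- ===== VERDICT (by name: the statement is the Claim_ definition above) =====
theorem isGoodFortune_spec : Claim_equal_isGoodFortune := by
  intro name _
  unfold Spec_isGoodFortune isGoodFortune isGoodFortune_alt
  simp only [pvFoldA, pvFreqGetD, zero_add]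
  have h1 : (List.map (fun c => ((List.count c name.toList : Nat) : Int)) "EVILevil".toList).sum
      = pvGroupSum pvEvilLetters name.toList := rfl
  have h2 : (List.map (fun c => ((List.count c name.toList : Nat) : Int)) "BADbad".toList).sum
      = pvGroupSum pvBadLetters name.toList := rfl
  have hlen : PySem.Str.len name = (name.toList.length : Int) := by
    simp [PySem.Str.len_eq]
  rw [h1, h2, hlen]
  have hE := pvGroupSum_nonneg pvEvilLetters name.toList
  set e := pvGroupSum pvEvilLetters name.toList with he
  set b := pvGroupSum pvBadLetters name.toList with hb
  set s := ((List.count ' ' name.toList : Nat) : Int) with hs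
  set n := ((name.toList.length : Nat) : Int) with hn
  by_cases h : e > 0
  · simp [h, show ¬ e = 0 from by omega]
  · have he0 : e = 0 := by omega
    by_cases h2c : n - (e + b) - s - (e + b) ≤ 0
    · simp [h, h2c, show ¬ (n - (e + b) - s > e + b) from by omega]
    · simp [he0, show ¬ n ≤ b + s + b from by omega, show b < n - b - s from by omega]
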